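-- pv_equiv track=rewrite | github.com/MCSCPCB/VanillaTrain | tools/template/tools/compress_json/compress_json.py | minify_json_text
-- ===== SOURCE A (Python) =====
-- def minify_json_text(text: str) -> str:
--     result: list[str] = []
--     in_string = False
--     escaped = False
--
--     for char in text:
--         if in_string:
--             result.append(char)
--             if escaped:
--                 escaped = False
--             elif char == "\\":
--                 escaped = True
--             elif char == '"':
--                 in_string = False
--             continue
--
--         if char in " \t\r\n":
--             continue
--
--         result.append(char)
--         if char == '"':
--             in_string = True
--
--     return "".join(result)
-- ===== SOURCE B (Python) =====
-- def minify_json_text(text: str) -> str: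
--     out: list[str] = []
--     i = 0
--     n = len(text)
--     while i < n:
--         c = text[i]
--         if c == '"':
--             # string token: scan to its closing quote, copy verbatim as one slice
--             j = i + 1
--             while j < n:
--                 if text[j] == '\\':
--                     j += 2
--                 elif text[j] == '"':
--                     j += 1
--                     break
--                 else:
--                     j += 1
--             out.append(text[i:j])
--             i = j
--         elif c in ' \t\r\n':
--             i += 1
--         else:
--             out.append(c)
--             i += 1
--     return ''.join(out)
-- ===== Notes on version B (the rewrite author's own statement) =====
-- stated objective: alternative
-- what changed: Replaces the per-character state machine with in_string/escaped flags by a two-level token scan: the outer loop copies or drops single characters, and on an opening quote an inner scan finds the end of the whole string literal (stepping over backslash escapes) and copies it verbatim as one slice.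
import Mathlib
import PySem

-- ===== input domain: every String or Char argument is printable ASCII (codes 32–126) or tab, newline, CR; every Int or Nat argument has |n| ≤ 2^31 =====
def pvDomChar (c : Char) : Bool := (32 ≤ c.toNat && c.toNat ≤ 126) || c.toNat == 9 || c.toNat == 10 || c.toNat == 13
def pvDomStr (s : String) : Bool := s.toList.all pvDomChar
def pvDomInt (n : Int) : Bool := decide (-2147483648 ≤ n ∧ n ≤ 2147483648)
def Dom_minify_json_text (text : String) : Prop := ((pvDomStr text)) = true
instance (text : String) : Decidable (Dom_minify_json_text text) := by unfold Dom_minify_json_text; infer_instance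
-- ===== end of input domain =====

-- B replaces A's per-character in_string/escaped state machine by a token scan that copies each
-- whole string literal as one verbatim chunk (objective: alternative; return value only).

-- ===== PORT A =====
-- per-character loop carrying (result, in_string, escaped)
def pvGoA : List Char → Bool → Bool → List Char
  | [], _, _ => []
  | c :: cs, in_string, escaped =>
    if in_string then
      c :: (if escaped then pvGoA cs true false
            else if c = '\\' then pvGoA cs true true
            else if c = '"' then pvGoA cs false escaped
            else pvGoA cs true escaped)
    else if c = ' ' ∨ c = '\t' ∨ c = '\r' ∨ c = '\n' then
      pvGoA cs in_string escaped
    else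
      c :: pvGoA cs (if c = '"' then true else in_string) escaped

def minify_json_text (text : String) : String :=
  String.ofList (pvGoA text.toList false false)

-- ===== PORT B =====
-- inner while loop of Source B: chars of a string token after its opening quote
-- (returns the token's chars, incl. the closing quote if present, and the rest)
def pvScanStr : List Char → List Char × List Char
  | [] => ([], [])
  | c :: cs =>
    if c = '\\' then
      match cs with
      | [] => ([c], [])
      | d :: ds => let p := pvScanStr ds; (c :: d :: p.1, p.2)
    else if c = '"' then ([c], cs)
    else let p := pvScanStr cs; (c :: p.1, p.2)

theorem pvScanStr_nil : pvScanStr [] = ([], []) := by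
  rw [pvScanStr.eq_def]

theorem pvScanStr_bs_nil : pvScanStr ['\\'] = (['\\'], []) := by
  rw [pvScanStr.eq_def]; simp

theorem pvScanStr_bs (d : Char) (ds : List Char) :
    pvScanStr ('\\' :: d :: ds) = ('\\' :: d :: (pvScanStr ds).1, (pvScanStr ds).2) := by
  rw [pvScanStr.eq_def]; simp

theorem pvScanStr_quote (cs : List Char) : pvScanStr ('"' :: cs) = (['"'], cs) := by
  rw [pvScanStr.eq_def]; simp

theorem pvScanStr_other (c : Char) (cs : List Char) (h1 : ¬ c = '\\') (h2 : ¬ c = '"') :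
    pvScanStr (c :: cs) = (c :: (pvScanStr cs).1, (pvScanStr cs).2) := by
  rw [pvScanStr.eq_def]; simp [h1, h2]

theorem pvScanStr_rest_le' : ∀ (n : Nat) (cs : List Char), cs.length ≤ n →
    (pvScanStr cs).2.length ≤ cs.length := by
  intro n
  induction n with
  | zero =>
    intro cs h
    have : cs = [] := List.eq_nil_of_length_eq_zero (Nat.le_zero.mp h)
    subst this; simp [pvScanStr_nil]
  | succ n ih =>
    intro cs h
    cases cs with
    | nil => simp [pvScanStr_nil]
    | cons c cs =>
      simp only [List.length_cons, Nat.succ_le_succ_iff] at h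
      by_cases hb : c = '\\'
      · subst hb
        cases cs with
        | nil => simp [pvScanStr_bs_nil]
        | cons d ds =>
          have hds : ds.length ≤ n := by simp at h; omega
          have := ih ds hds
          simp [pvScanStr_bs]; omega
      · by_cases hq : c = '"'
        · subst hq; simp [pvScanStr_quote]
        · have := ih cs h
          simp [pvScanStr_other c cs hb hq]; omega

theorem pvScanStr_rest_le (cs : List Char) : (pvScanStr cs).2.length ≤ cs.length :=
  pvScanStr_rest_le' cs.length cs le_rfl

-- outer while loop of Source B
def pvGoB : List Char → List Char
  | [] => []
  | c :: cs =>
    if c = '"' then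
      (c :: (pvScanStr cs).1) ++ pvGoB (pvScanStr cs).2
    else if c = ' ' ∨ c = '\t' ∨ c = '\r' ∨ c = '\n' then
      pvGoB cs
    else
      c :: pvGoB cs
termination_by l => l.length
decreasing_by
  · have := pvScanStr_rest_le cs; simp; omega
  · simp
  · simp

def minify_json_text_alt (text : String) : String :=
  String.ofList (pvGoB text.toList)

-- ===== PRECONDITION & SPEC =====
def Spec_minify_json_text (text : String) (out : String) : Prop := out = minify_json_text_alt text
instance (text : String) (out : String) : Decidable (Spec_minify_json_text text out) := by unfold Spec_minify_json_text; infer_instance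

-- ===== CLAIM (what is proved, stated in full; the proofs are below) =====
def Claim_equal_minify_json_text : Prop := ∀ (text : String), Dom_minify_json_text text → Spec_minify_json_text text (minify_json_text text)

-- ===== LEMMAS AND PROOFS =====
theorem pvGoA_eq_pvGoB : ∀ n (cs : List Char), cs.length ≤ n →
    (pvGoA cs true false = (pvScanStr cs).1 ++ pvGoB (pvScanStr cs).2) ∧
    (pvGoA cs false false = pvGoB cs) := by
  intro n
  induction n with
  | zero =>
    intro cs h
    have : cs = [] := List.eq_nil_of_length_eq_zero (Nat.le_zero.mp h)
    subst this
    simp [pvGoA, pvScanStr_nil, pvGoB]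
  | succ n ih =>
    intro cs h
    cases cs with
    | nil => simp [pvGoA, pvScanStr_nil, pvGoB]
    | cons c cs =>
      simp only [List.length_cons, Nat.succ_le_succ_iff] at h
      constructor
      · -- in_string = true, escaped = false
        by_cases hb : c = '\\'
        · subst hb
          cases cs with
          | nil => simp [pvGoA, pvScanStr_bs_nil, pvGoB]
          | cons d ds =>
            have hds : ds.length ≤ n := by simp at h; omega
            simp [pvGoA, pvScanStr_bs, (ih ds hds).1]
        · by_cases hq : c = '"'
          · subst hq
            simp [pvGoA, pvScanStr_quote, (ih cs h).2]
          · simp [pvGoA, pvScanStr_other c cs hb hq, hb, hq, (ih cs h).1]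
      · -- in_string = false
        by_cases hq : c = '"'
        · subst hq
          simp [pvGoA, pvGoB, (ih cs h).1]
        · by_cases hw : c = ' ' ∨ c = '\t' ∨ c = '\r' ∨ c = '\n'
          · have hq' : ¬ c = '"' := hq
            simp [pvGoA, pvGoB, hw, hq', (ih cs h).2]
          · simp [pvGoA, pvGoB, hw, hq, (ih cs h).2]

-- ===== VERDICT (by name: the statement is the Claim_ definition above) =====
theorem minify_json_text_spec : Claim_equal_minify_json_text := by
  intro text _
  unfold Spec_minify_json_text minify_json_text minify_json_text_alt
  rw [(pvGoA_eq_pvGoB text.toList.length text.toList le_rfl).2]
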